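-- pv_equiv track=rewrite | github.com/drago11072004/sudoku | main.py | valid_list
-- ===== SOURCE A (Python) =====
-- from typing import Tuple, List
--
-- def valid_list(lst: List[int])-> bool:
-- 	"""This function takes a lists as an input and returns true if the given list is valid.
-- 	The list will be a single block , single row or single column only.
-- 	A valid list is defined as a list in which all non empty elements doesn't have a repeating element.
-- 	"""
-- 	l1=[]
-- 	for i in range(0,len(lst)):
-- 		if lst[i]!=0:
-- 			l1.append(lst[i])
-- 		else:
-- 			pass
-- 	st=set(l1)
-- 	l2=list(st)
-- 	if len(l1)!=len(l2):
-- 		return False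
-- 	else:
-- 		return True
-- ===== SOURCE B (Python) =====
-- def valid_list(lst):
--     nz = sorted(x for x in lst if x != 0)
--     for a, b in zip(nz, nz[1:]):
--         if a == b:
--             return False
--     return True
-- ===== Notes on version B (the rewrite author's own statement) =====
-- stated objective: alternative
-- what changed: Replaces A's set-cardinality test (collect non-zeros, build a set, compare lengths) by sort-then-adjacent-scan: sort the non-zero elements and report a duplicate iff two equal elements end up adjacent.
import Mathlib
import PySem

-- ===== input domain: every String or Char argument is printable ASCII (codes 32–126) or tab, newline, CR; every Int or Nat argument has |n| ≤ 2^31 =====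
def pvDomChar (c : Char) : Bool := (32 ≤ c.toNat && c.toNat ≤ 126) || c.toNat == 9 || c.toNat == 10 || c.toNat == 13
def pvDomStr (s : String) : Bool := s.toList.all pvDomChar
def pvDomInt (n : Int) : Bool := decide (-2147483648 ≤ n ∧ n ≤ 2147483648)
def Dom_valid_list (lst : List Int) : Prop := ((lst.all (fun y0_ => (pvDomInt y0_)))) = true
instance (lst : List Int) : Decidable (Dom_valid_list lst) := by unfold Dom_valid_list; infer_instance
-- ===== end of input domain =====

-- B detects duplicates by sorting the non-zero elements and scanning adjacent pairs, instead of A's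
-- set-cardinality comparison (objective: alternative algorithm, similar cost).

-- ===== PORT A =====
-- l1 = elements lst[i] ≠ 0 collected over range(0, len(lst)); indices are always in range, so pyGetD is exact here.
-- list(st) is consumed only through its length, which does not depend on Python's set iteration order.
def valid_list (lst : List Int) : Bool :=
  let l1 := (PySem.List.pyRange 0 lst.length 1).foldl
    (fun acc i => if PySem.List.pyGetD lst i 0 ≠ 0 then acc ++ [PySem.List.pyGetD lst i 0] else acc) []
  let st : PySem.Set Int := PySem.Set.ofList l1
  let l2 : List Int := st
  if l1.length ≠ l2.length then false else true

-- ===== PORT B =====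
-- the for-loop with early return over zip(nz, nz[1:])
def valid_list_alt_scan : List (Int × Int) → Bool
  | [] => true
  | (a, b) :: rest => if a = b then false else valid_list_alt_scan rest

def valid_list_alt (lst : List Int) : Bool :=
  let nz := PySem.List.sorted (lst.filter (fun x => x ≠ 0)) (fun x => x) false
  valid_list_alt_scan (nz.zip (PySem.List.slice nz (some 1) none))

-- ===== PRECONDITION & SPEC =====
def Spec_valid_list (lst : List Int) (out : Bool) : Prop := out = valid_list_alt lst
instance (lst : List Int) (out : Bool) : Decidable (Spec_valid_list lst out) := by unfold Spec_valid_list; infer_instance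

-- ===== CLAIM (what is proved, stated in full; the proofs are below) =====
def Claim_equal_valid_list : Prop := ∀ (lst : List Int), Dom_valid_list lst → Spec_valid_list lst (valid_list lst)

-- ===== LEMMAS AND PROOFS =====

theorem len_foldl_add_le (l : List Int) (s : PySem.Set Int) :
    (l.foldl PySem.Set.add s).length ≤ s.length + l.length := by
  induction l generalizing s with
  | nil => simp
  | cons x xs ih =>
    simp only [List.foldl_cons]
    have := ih (PySem.Set.add s x)
    have hadd : (PySem.Set.add s x).length ≤ s.length + 1 := by
      simp only [PySem.Set.add]
      split <;> simp
    simp only [List.length_cons]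
    omega

theorem len_foldl_add_iff (l : List Int) (s : PySem.Set Int) :
    ((l.foldl PySem.Set.add s).length = s.length + l.length) ↔
    (l.Nodup ∧ ∀ x ∈ l, x ∉ s) := by
  induction l generalizing s with
  | nil => simp
  | cons x xs ih =>
    simp only [List.foldl_cons, List.nodup_cons, List.mem_cons]
    by_cases hx : x ∈ s
    · have hadd : PySem.Set.add s x = s := by
        simp [PySem.Set.add, PySem.Set.contains, hx]
      rw [hadd]
      have hle := len_foldl_add_le xs s
      constructor
      · intro h; simp only [List.length_cons] at h; omega
      · rintro ⟨_, hall⟩; exact absurd hx (hall x (Or.inl rfl))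
    · have hadd : PySem.Set.add s x = s ++ [x] := by
        simp [PySem.Set.add, PySem.Set.contains, hx]
      rw [hadd]
      have h2 := ih (s ++ [x])
      constructor
      · intro h
        obtain ⟨hnd, hall⟩ := h2.mp (by
          simp only [List.length_append, List.length_singleton]
          simp only [List.length_cons] at h
          omega)
        refine ⟨⟨fun hxm => (hall x hxm) (by simp), hnd⟩, ?_⟩
        rintro y (rfl | hy)
        · exact hx
        · exact fun hys => hall y hy (List.mem_append.mpr (Or.inl hys))
      · rintro ⟨⟨hxn, hnd⟩, hall⟩
        have h3 := h2.mpr ⟨hnd, fun y hy hmem => by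
          rcases List.mem_append.mp hmem with h1 | h4
          · exact hall y (Or.inr hy) h1
          · exact hxn ((List.mem_singleton.mp h4) ▸ hy)⟩
        simp only [List.length_append, List.length_singleton] at h3
        simp only [List.length_cons]
        omega

theorem ofList_len_iff (l : List Int) :
    ((PySem.Set.ofList l).length = l.length) ↔ l.Nodup := by
  rw [PySem.Set.ofList_eq_foldl]
  have := len_foldl_add_iff l PySem.Set.empty
  simp only [PySem.Set.empty] at this ⊢
  simpa using this

theorem valid_list_eq_nodup (lst : List Int) :
    valid_list lst = decide (lst.filter (fun x => x ≠ 0)).Nodup := by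
  unfold valid_list
  have hl1 : (List.foldl
        (fun acc i => if PySem.List.pyGetD lst i 0 ≠ 0 then acc ++ [PySem.List.pyGetD lst i 0] else acc) []
        (PySem.List.pyRange 0 (PySem.List.len lst) 1))
      = lst.filter (fun x => decide (x ≠ 0)) := by
    have h := PySem.List.foldl_pyRange_pyGetD lst 0
      (fun acc v => if v ≠ 0 then acc ++ [v] else acc) [] (a := 0) (by omega)
    simp only [Int.toNat_zero, List.drop_zero] at h
    rw [PySem.List.foldl_append_ite_eq_filter] at h
    simpa using h
  simp only [PySem.List.len] at hl1
  rw [hl1]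
  by_cases h : (lst.filter (fun x => decide (x ≠ 0))).Nodup
  · have h1 := (ofList_len_iff (lst.filter (fun x => decide (x ≠ 0)))).mpr h
    rw [if_neg (by omega), decide_eq_true h]
  · rw [if_pos (fun he => h ((ofList_len_iff _).mp he.symm)), decide_eq_false h]

-- adjacent scan of a ≤-sorted list decides Nodup
theorem scan_sorted_eq_nodup (s : List Int) (hs : s.Pairwise (· ≤ ·)) :
    valid_list_alt_scan (s.zip (s.drop 1)) = decide s.Nodup := by
  induction s with
  | nil => simp [valid_list_alt_scan]
  | cons x t ih =>
    cases t with
    | nil => simp [valid_list_alt_scan]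
    | cons y u =>
      simp only [List.drop_succ_cons, List.drop_zero, List.zip_cons_cons, valid_list_alt_scan]
      rcases List.pairwise_cons.mp hs with ⟨hx, ht⟩
      by_cases hxy : x = y
      · rw [if_pos hxy]
        have : ¬ (x :: y :: u).Nodup := by
          intro h
          exact (List.nodup_cons.mp h).1 (by simp [hxy])
        simp [this]
      · rw [if_neg hxy]
        have hxlt : x < y := lt_of_le_of_ne (hx y (by simp)) hxy
        have hxnot : x ∉ y :: u := by
          intro hmem
          rcases List.mem_cons.mp hmem with rfl | hu
          · exact hxy rfl
          · have hyz : y ≤ x := (List.pairwise_cons.mp ht).1 x hu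
            exact absurd (lt_of_lt_of_le hxlt hyz) (lt_irrefl x)
        simp only [List.drop_succ_cons, List.drop_zero] at ih
        rw [ih ht]
        simp [List.nodup_cons, hxnot]

theorem valid_list_alt_eq_nodup (lst : List Int) :
    valid_list_alt lst = decide (lst.filter (fun x => x ≠ 0)).Nodup := by
  unfold valid_list_alt
  have hslice : PySem.List.slice
      (PySem.List.sorted (lst.filter (fun x => x ≠ 0)) (fun x => x) false) (some 1) none
      = (PySem.List.sorted (lst.filter (fun x => x ≠ 0)) (fun x => x) false).drop 1 := by
    exact PySem.List.slice_from_natCast _ 1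
  dsimp only
  rw [hslice,
    scan_sorted_eq_nodup _ (PySem.List.sorted_pairwise (lst.filter (fun x => x ≠ 0)) (fun x => x)),
    decide_eq_decide]
  exact (PySem.List.sorted_perm (lst.filter (fun x => x ≠ 0)) (fun x => x) false).nodup_iff

-- ===== VERDICT (by name: the statement is the Claim_ definition above) =====
theorem valid_list_spec : Claim_equal_valid_list := by
  intro lst _
  unfold Spec_valid_list
  rw [valid_list_eq_nodup, valid_list_alt_eq_nodup]
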